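-- pv_equiv track=rewrite | github.com/Teninator/Contract-clauser | logic/clause_finder.py | categorize_clauses
-- ===== SOURCE A (Python) =====
-- def categorize_clauses(clauses: list) -> dict:
--     categories = {
--         "payment_terms": [],
--         "termination": [],
--         "confidentiality": [],
--         "liability": [],
--         "miscellaneous": []
--     }
--
--     for c in clauses:
--         lc = c.lower()
--
--         if any(x in lc for x in ["pay", "fee", "amount", "invoice"]):
--             categories["payment_terms"].append(c)
--         elif any(x in lc for x in ["terminate", "termination", "end agreement"]):
--             categories["termination"].append(c)
--         elif any(x in lc for x in ["confidential", "non-disclosure", "nda"]):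
--             categories["confidentiality"].append(c)
--         elif any(x in lc for x in ["liability", "indemnify", "hold harmless"]):
--             categories["liability"].append(c)
--         else:
--             categories["miscellaneous"].append(c)
--
--     return categories
-- ===== SOURCE B (Python) =====
-- RULES = [
--     ("payment_terms", ["pay", "fee", "amount", "invoice"]),
--     ("termination", ["terminate", "termination", "end agreement"]),
--     ("confidentiality", ["confidential", "non-disclosure", "nda"]),
--     ("liability", ["liability", "indemnify", "hold harmless"]),
-- ]
--
--
-- def _label(clause):
--     lc = clause.lower()
--     for name, kws in RULES:
--         for k in kws:
--             if k in lc: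
--                 return name
--     return "miscellaneous"
--
--
-- def categorize_clauses(clauses: list) -> dict:
--     labels = [_label(c) for c in clauses]
--     names = [name for name, _ in RULES] + ["miscellaneous"]
--     return {name: [c for lbl, c in zip(labels, clauses) if lbl == name] for name in names}
-- ===== Notes on version B (the rewrite author's own statement) =====
-- stated objective: idiomatic
-- what changed: Replaces the single-pass if/elif chain mutating a dict in place with a data-driven rules table plus a per-clause labeling helper, building each category's list by a separate filter comprehension over the input.
import Mathlib
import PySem

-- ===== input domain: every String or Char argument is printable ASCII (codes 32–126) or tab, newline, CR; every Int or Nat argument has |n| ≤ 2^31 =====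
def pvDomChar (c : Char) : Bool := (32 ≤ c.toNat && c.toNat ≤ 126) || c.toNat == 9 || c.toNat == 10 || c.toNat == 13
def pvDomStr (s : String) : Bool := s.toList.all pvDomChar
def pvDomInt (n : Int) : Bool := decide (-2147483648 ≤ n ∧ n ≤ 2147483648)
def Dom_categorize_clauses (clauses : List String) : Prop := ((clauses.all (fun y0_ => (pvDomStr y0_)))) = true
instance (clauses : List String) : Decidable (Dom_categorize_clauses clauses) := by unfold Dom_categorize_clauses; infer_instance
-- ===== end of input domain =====

-- B is the same categorization written idiomatically: a rules table + labeling helper, one filter per category.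

-- B restates the same categorization idiomatically: a rules table + a labeling helper, one filter per category.

-- ===== PORT A =====
-- categories["k"].append(c) on an always-present key is Dict.modify with an (unreachable) default [].
def categorize_clauses (clauses : List String) : List (String × List String) :=
  let categories : PySem.Dict String (List String) :=
    ((((PySem.Dict.empty.insert "payment_terms" ([] : List String)).insert
        "termination" ([] : List String)).insert
        "confidentiality" ([] : List String)).insert
        "liability" ([] : List String)).insert "miscellaneous" ([] : List String)
  (clauses.foldl (fun d c =>
    let lc := PySem.Str.lower c
    if ["pay", "fee", "amount", "invoice"].any (fun x => PySem.Str.isIn x lc) then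
      d.modify "payment_terms" [] (fun l => l ++ [c])
    else if ["terminate", "termination", "end agreement"].any (fun x => PySem.Str.isIn x lc) then
      d.modify "termination" [] (fun l => l ++ [c])
    else if ["confidential", "non-disclosure", "nda"].any (fun x => PySem.Str.isIn x lc) then
      d.modify "confidentiality" [] (fun l => l ++ [c])
    else if ["liability", "indemnify", "hold harmless"].any (fun x => PySem.Str.isIn x lc) then
      d.modify "liability" [] (fun l => l ++ [c])
    else
      d.modify "miscellaneous" [] (fun l => l ++ [c])) categories).items

-- ===== PORT B =====
def pvRules : List (String × List String) :=
  [("payment_terms", ["pay", "fee", "amount", "invoice"]),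
   ("termination", ["terminate", "termination", "end agreement"]),
   ("confidentiality", ["confidential", "non-disclosure", "nda"]),
   ("liability", ["liability", "indemnify", "hold harmless"])]

def pvLabel (clause : String) : String :=
  let lc := PySem.Str.lower clause
  match pvRules.find? (fun r => r.2.any (fun k => PySem.Str.isIn k lc)) with
  | some r => r.1
  | none => "miscellaneous"

def categorize_clauses_alt (clauses : List String) : List (String × List String) :=
  let labels := clauses.map (fun c => pvLabel c)
  (pvRules.map Prod.fst ++ ["miscellaneous"]).map
    (fun name => (name, ((labels.zip clauses).filter (fun p => p.1 == name)).map Prod.snd))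

-- ===== PRECONDITION & SPEC =====
def Spec_categorize_clauses (clauses : List String) (out : List (String × List String)) : Prop := out = categorize_clauses_alt clauses
instance (clauses : List String) (out : List (String × List String)) : Decidable (Spec_categorize_clauses clauses out) := by unfold Spec_categorize_clauses; infer_instance

-- ===== CLAIM (what is proved, stated in full; the proofs are below) =====
def Claim_equal_categorize_clauses : Prop := ∀ (clauses : List String), Dom_categorize_clauses clauses → Spec_categorize_clauses clauses (categorize_clauses clauses)

-- ===== LEMMAS AND PROOFS =====

-- B's zip-with-labels filter of a category is the plain filter by label.
theorem pv_zip (name : String) (l : List String) :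
    (((l.map (fun c => pvLabel c)).zip l).filter (fun p => p.1 == name)).map Prod.snd =
      l.filter (fun c => pvLabel c == name) := by
  induction l with
  | nil => rfl
  | cons c t ih => by_cases h : (pvLabel c == name) = true <;> simp [h, ih]

-- A\'s loop, with the five accumulators generalized, equals B\'s five filters appended onto them.
theorem pv_loop_eq (clauses : List String) (a b x y z : List String) :
    clauses.foldl (fun d c =>
      if ["pay", "fee", "amount", "invoice"].any (fun k => PySem.Str.isIn k (PySem.Str.lower c)) then
        d.modify "payment_terms" [] (fun l => l ++ [c])
      else if ["terminate", "termination", "end agreement"].any (fun k => PySem.Str.isIn k (PySem.Str.lower c)) then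
        d.modify "termination" [] (fun l => l ++ [c])
      else if ["confidential", "non-disclosure", "nda"].any (fun k => PySem.Str.isIn k (PySem.Str.lower c)) then
        d.modify "confidentiality" [] (fun l => l ++ [c])
      else if ["liability", "indemnify", "hold harmless"].any (fun k => PySem.Str.isIn k (PySem.Str.lower c)) then
        d.modify "liability" [] (fun l => l ++ [c])
      else
        d.modify "miscellaneous" [] (fun l => l ++ [c]))
      (⟨[("payment_terms", a), ("termination", b), ("confidentiality", x),
        ("liability", y), ("miscellaneous", z)]⟩ : PySem.Dict String (List String)) =
    ⟨[("payment_terms", a ++ clauses.filter (fun c => pvLabel c == "payment_terms")),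
     ("termination", b ++ clauses.filter (fun c => pvLabel c == "termination")),
     ("confidentiality", x ++ clauses.filter (fun c => pvLabel c == "confidentiality")),
     ("liability", y ++ clauses.filter (fun c => pvLabel c == "liability")),
     ("miscellaneous", z ++ clauses.filter (fun c => pvLabel c == "miscellaneous"))]⟩ := by
  induction clauses generalizing a b x y z with
  | nil => simp
  | cons c t ih =>
    simp only [List.foldl_cons, List.filter_cons]
    cases hc1 : (["pay", "fee", "amount", "invoice"].any (fun k => PySem.Str.isIn k (PySem.Str.lower c))) with
    | true =>
      have hl : pvLabel c = "payment_terms" := by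
        simp only [pvLabel, pvRules]
        rw [List.find?_cons_of_pos (by simpa using hc1)]
      have hstep : (⟨[("payment_terms", a), ("termination", b), ("confidentiality", x),
          ("liability", y), ("miscellaneous", z)]⟩ : PySem.Dict String (List String)).modify
            "payment_terms" [] (fun l => l ++ [c]) =
          ⟨[("payment_terms", a ++ [c]), ("termination", b), ("confidentiality", x),
          ("liability", y), ("miscellaneous", z)]⟩ := by
        simp [PySem.Dict.modify, PySem.Dict.insert, PySem.Dict.getD, PySem.Dict.get?, PySem.Dict.contains]
      simp only [if_true, hl, hstep]
      rw [ih]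
      simp
    | false =>
    cases hc2 : (["terminate", "termination", "end agreement"].any (fun k => PySem.Str.isIn k (PySem.Str.lower c))) with
    | true =>
      have hl : pvLabel c = "termination" := by
        simp only [pvLabel, pvRules]
        rw [List.find?_cons_of_neg (by simpa using hc1), List.find?_cons_of_pos (by simpa using hc2)]
      have hstep : (⟨[("payment_terms", a), ("termination", b), ("confidentiality", x),
          ("liability", y), ("miscellaneous", z)]⟩ : PySem.Dict String (List String)).modify
            "termination" [] (fun l => l ++ [c]) =
          ⟨[("payment_terms", a), ("termination", b ++ [c]), ("confidentiality", x),
          ("liability", y), ("miscellaneous", z)]⟩ := by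
        simp [PySem.Dict.modify, PySem.Dict.insert, PySem.Dict.getD, PySem.Dict.get?, PySem.Dict.contains]
      simp only [Bool.false_eq_true, if_false, if_true, hl, hstep]
      rw [ih]
      simp
    | false =>
    cases hc3 : (["confidential", "non-disclosure", "nda"].any (fun k => PySem.Str.isIn k (PySem.Str.lower c))) with
    | true =>
      have hl : pvLabel c = "confidentiality" := by
        simp only [pvLabel, pvRules]
        rw [List.find?_cons_of_neg (by simpa using hc1), List.find?_cons_of_neg (by simpa using hc2),
            List.find?_cons_of_pos (by simpa using hc3)]
      have hstep : (⟨[("payment_terms", a), ("termination", b), ("confidentiality", x),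
          ("liability", y), ("miscellaneous", z)]⟩ : PySem.Dict String (List String)).modify
            "confidentiality" [] (fun l => l ++ [c]) =
          ⟨[("payment_terms", a), ("termination", b), ("confidentiality", x ++ [c]),
          ("liability", y), ("miscellaneous", z)]⟩ := by
        simp [PySem.Dict.modify, PySem.Dict.insert, PySem.Dict.getD, PySem.Dict.get?, PySem.Dict.contains]
      simp only [Bool.false_eq_true, if_false, if_true, hl, hstep]
      rw [ih]
      simp
    | false =>
    cases hc4 : (["liability", "indemnify", "hold harmless"].any (fun k => PySem.Str.isIn k (PySem.Str.lower c))) with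
    | true =>
      have hl : pvLabel c = "liability" := by
        simp only [pvLabel, pvRules]
        rw [List.find?_cons_of_neg (by simpa using hc1), List.find?_cons_of_neg (by simpa using hc2),
            List.find?_cons_of_neg (by simpa using hc3), List.find?_cons_of_pos (by simpa using hc4)]
      have hstep : (⟨[("payment_terms", a), ("termination", b), ("confidentiality", x),
          ("liability", y), ("miscellaneous", z)]⟩ : PySem.Dict String (List String)).modify
            "liability" [] (fun l => l ++ [c]) =
          ⟨[("payment_terms", a), ("termination", b), ("confidentiality", x),
          ("liability", y ++ [c]), ("miscellaneous", z)]⟩ := by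
        simp [PySem.Dict.modify, PySem.Dict.insert, PySem.Dict.getD, PySem.Dict.get?, PySem.Dict.contains]
      simp only [Bool.false_eq_true, if_false, if_true, hl, hstep]
      rw [ih]
      simp
    | false =>
      have hl : pvLabel c = "miscellaneous" := by
        simp only [pvLabel, pvRules]
        rw [List.find?_cons_of_neg (by simpa using hc1), List.find?_cons_of_neg (by simpa using hc2),
            List.find?_cons_of_neg (by simpa using hc3), List.find?_cons_of_neg (by simpa using hc4)]
        rfl
      have hstep : (⟨[("payment_terms", a), ("termination", b), ("confidentiality", x),
          ("liability", y), ("miscellaneous", z)]⟩ : PySem.Dict String (List String)).modify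
            "miscellaneous" [] (fun l => l ++ [c]) =
          ⟨[("payment_terms", a), ("termination", b), ("confidentiality", x),
          ("liability", y), ("miscellaneous", z ++ [c])]⟩ := by
        simp [PySem.Dict.modify, PySem.Dict.insert, PySem.Dict.getD, PySem.Dict.get?, PySem.Dict.contains]
      simp only [Bool.false_eq_true, if_false, hl, hstep]
      rw [ih]
      simp

-- ===== VERDICT (by name: the statement is the Claim_ definition above) =====
theorem categorize_clauses_spec : Claim_equal_categorize_clauses := by
  intro clauses _
  unfold Spec_categorize_clauses categorize_clauses categorize_clauses_alt
  simpa [pvRules, pv_zip, PySem.Dict.empty, PySem.Dict.insert, PySem.Dict.getD, PySem.Dict.get?,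
    PySem.Dict.contains, PySem.Dict.items] using
    congrArg PySem.Dict.items (pv_loop_eq clauses [] [] [] [] [])
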